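-- pv_equiv track=rewrite | github.com/Palmer422M/Wordle-Solver | wordle3.py | get_letter_states
-- ===== SOURCE A (Python) =====
-- ST_REJECT = 0
--
-- ST_CORRECT = 1
--
-- ST_ELSEWHERE = 2
--
-- def get_letter_states(wordle, guess):
--
--     state = [None]*5
--
--     for ltr in range(5):
--         if  guess[ltr] == wordle[ltr]:
--             state[ltr] = ST_CORRECT
--         elif guess[ltr] not in wordle:
--             state[ltr] = ST_REJECT
--
--     # now done with two easy cases, now set elsewhere as long stat hasn't already been marked as one of the other
--     # non-reject states
--     # count up how many states are set to CORRECT or ELSEWHERE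
--     # count up how many times this letter appears in wordle
--     # if a less than b, set as ELSEWHERE
--
--     for ltr in range(5):
--         if state[ltr] is not None:
--             continue
--
--         letter_count = wordle.count(guess[ltr])
--         mark_count = 0
--         for k in range(5):
--             if k == ltr:
--                 continue
--             if guess[k] == guess[ltr] and state[k] == ST_ELSEWHERE:
--                 mark_count += 1
--
--         if letter_count > mark_count:
--             state[ltr] = ST_ELSEWHERE
--         else:
--             state[ltr] = ST_REJECT
--
--
--     return state
-- ===== SOURCE B (Python) =====
-- ST_REJECT = 0
--
-- ST_CORRECT = 1
--
-- ST_ELSEWHERE = 2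
--
-- def get_letter_states(wordle, guess):
--     # pass 1: greens, and rejects for letters absent from wordle
--     state = [None]*5
--     for ltr in range(5):
--         if guess[ltr] == wordle[ltr]:
--             state[ltr] = ST_CORRECT
--         elif guess[ltr] not in wordle:
--             state[ltr] = ST_REJECT
--
--     # pass 2: one left-to-right sweep with a maintained letter counter
--     # (full multiset of wordle; decremented only on ELSEWHERE assignments)
--     remaining = {}
--     for ch in wordle:
--         remaining[ch] = remaining.get(ch, 0) + 1
--
--     for ltr in range(5):
--         if state[ltr] is None:
--             c = guess[ltr]
--             if remaining.get(c, 0) > 0: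
--                 state[ltr] = ST_ELSEWHERE
--                 remaining[c] = remaining[c] - 1
--             else:
--                 state[ltr] = ST_REJECT
--
--     return state
-- ===== Notes on version B (the rewrite author's own statement) =====
-- stated objective: alternative
-- what changed: A's second pass rescans all five positions for every unresolved letter to count same-letter ELSEWHERE marks; B builds a letter-count dict of wordle once and does a single left-to-right sweep that decrements the counter on each ELSEWHERE assignment, eliminating the inner rescan.
import Mathlib
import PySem

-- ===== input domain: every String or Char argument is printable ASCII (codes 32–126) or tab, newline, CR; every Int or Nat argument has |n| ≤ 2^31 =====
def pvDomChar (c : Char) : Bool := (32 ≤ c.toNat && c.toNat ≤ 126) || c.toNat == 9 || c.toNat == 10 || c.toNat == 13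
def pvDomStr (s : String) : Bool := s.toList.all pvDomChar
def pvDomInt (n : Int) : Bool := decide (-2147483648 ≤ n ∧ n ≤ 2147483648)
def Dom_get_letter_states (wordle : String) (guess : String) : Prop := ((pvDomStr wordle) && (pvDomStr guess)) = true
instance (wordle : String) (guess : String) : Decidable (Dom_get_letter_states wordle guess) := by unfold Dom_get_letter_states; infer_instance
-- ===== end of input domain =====

-- B replaces A's quadratic inner rescan (mark_count) by one left-to-right sweep over a
-- maintained letter counter; objective: alternative/simpler. Pass 1 is the identical Python
-- code in A and B, so both ports share the helper pvPass1.

-- ===== PORT A =====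

-- pass 1 (shared, identical in both Pythons): greens, and rejects for letters absent from
-- wordle. wordle[ltr] / guess[ltr] raise IndexError for strings shorter than 5: excluded by
-- Pre_; the '.getD' defaults are never reached on inputs satisfying Pre_.
def pvPass1 (wordle : String) (guess : String) : List (Option Int) :=
  (PySem.List.pyRange 0 5 1).foldl (fun state ltr =>
    let g := (PySem.Str.pyGet? guess ltr).getD ' '
    let w := (PySem.Str.pyGet? wordle ltr).getD ' '
    if g == w then state.set ltr.toNat (some 1)
    else if !(PySem.Str.isIn (String.ofList [g]) wordle) then state.set ltr.toNat (some 0)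
    else state) (List.replicate 5 none)

-- A's second loop body: rescan the whole state for same-letter ELSEWHERE marks (mark_count)
def pvStepA (wordle : String) (guess : String) (state : List (Option Int)) (ltr : Int) : List (Option Int) :=
  if ((PySem.List.pyGet? state ltr).getD none).isSome then state   -- 'is not None: continue'
  else
    let g := (PySem.Str.pyGet? guess ltr).getD ' '
    let letter_count : Int := (PySem.Str.count wordle (String.ofList [g]) : Int)
    let mark_count : Int := (PySem.List.pyRange 0 5 1).foldl (fun mc k =>
      if k == ltr then mc
      else if ((PySem.Str.pyGet? guess k).getD ' ' == g)
              && ((PySem.List.pyGet? state k).getD none == some 2) then mc + 1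
      else mc) 0
    if letter_count > mark_count then state.set ltr.toNat (some 2)
    else state.set ltr.toNat (some 0)

def get_letter_states (wordle : String) (guess : String) : List Int :=
  let state := pvPass1 wordle guess
  let state := (PySem.List.pyRange 0 5 1).foldl (fun st ltr => pvStepA wordle guess st ltr) state
  state.map (fun o => o.getD 0)

-- ===== PORT B =====

-- B's second loop body: one sweep consuming the maintained counter 'remaining'
def pvStepB (guess : String) (p : List (Option Int) × PySem.Dict Char Int) (ltr : Int) :
    List (Option Int) × PySem.Dict Char Int :=
  if ((PySem.List.pyGet? p.1 ltr).getD none).isSome then p   -- state[ltr] is not None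
  else
    let c := (PySem.Str.pyGet? guess ltr).getD ' '
    if p.2.getD c 0 > 0 then
      (p.1.set ltr.toNat (some 2), p.2.insert c (p.2.getD c 0 - 1))
    else (p.1.set ltr.toNat (some 0), p.2)

def get_letter_states_alt (wordle : String) (guess : String) : List Int :=
  let state := pvPass1 wordle guess
  -- remaining = {}; for ch in wordle: remaining[ch] = remaining.get(ch, 0) + 1
  let remaining : PySem.Dict Char Int :=
    wordle.toList.foldl (fun d ch => d.insert ch (d.getD ch 0 + 1)) PySem.Dict.empty
  let res := (PySem.List.pyRange 0 5 1).foldl (fun p ltr => pvStepB guess p ltr) (state, remaining)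
  res.1.map (fun o => o.getD 0)

-- ===== PRECONDITION & SPEC =====
-- Pre_: Python A indexes wordle[ltr] and guess[ltr] for ltr in range(5) and raises
-- IndexError when either string is shorter than 5 characters; exactly those inputs are excluded.
def Pre_get_letter_states (wordle : String) (guess : String) : Prop :=
  5 ≤ wordle.toList.length ∧ 5 ≤ guess.toList.length
instance (wordle : String) (guess : String) : Decidable (Pre_get_letter_states wordle guess) := by
  unfold Pre_get_letter_states; infer_instance

def pvWitness_get_letter_states : String × String := ("crane", "slate")

def Spec_get_letter_states (wordle : String) (guess : String) (out : List Int) : Prop := out = get_letter_states_alt wordle guess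
instance (wordle : String) (guess : String) (out : List Int) : Decidable (Spec_get_letter_states wordle guess out) := by unfold Spec_get_letter_states; infer_instance

-- ===== CLAIM (what is proved, stated in full; the proofs are below) =====
def Claim_equal_get_letter_states : Prop := ∀ (wordle : String) (guess : String), Dom_get_letter_states wordle guess → Pre_get_letter_states wordle guess → Spec_get_letter_states wordle guess (get_letter_states wordle guess)

-- ===== LEMMAS AND PROOFS =====

-- number of positions k < 5 currently marked ELSEWHERE whose guess letter is c
def pvE (guess : String) (st : List (Option Int)) (c : Char) : Int :=
  ((List.range 5).map (fun k =>
    if guess.toList.getD k ' ' = c ∧ st.getD k none = some 2 then (1 : Int) else 0)).sum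

lemma pvCount_go_single (g : Char) : ∀ (l : List Char) (fuel acc : Nat), l.length ≤ fuel →
    PySem.Chars.count.go [g] fuel l acc = acc + l.count g := by
  intro l
  induction l with
  | nil => intro fuel acc h; cases fuel <;> simp [PySem.Chars.count.go]
  | cons x t ih =>
    intro fuel acc h
    cases fuel with
    | zero => simp at h
    | succ f =>
      by_cases hx : x = g
      · subst hx
        simp [PySem.Chars.count.go, List.isPrefixOf, ih f (acc+1) (by simpa using h)]
        omega
      · simp [PySem.Chars.count.go, List.isPrefixOf, hx, ih f acc (by simpa using h),
          Ne.symm hx]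

-- wordle.count(c) for a single-character needle is the character count
lemma pvCountSingle (cs : List Char) (g : Char) :
    PySem.Chars.count cs [g] = cs.count g := by
  rw [show PySem.Chars.count cs [g] = PySem.Chars.count.go [g] cs.length cs 0 from by
      simp [PySem.Chars.count],
    pvCount_go_single g cs cs.length 0 le_rfl]
  simp

lemma pvGetD_set_not2 (l : List (Option Int)) (j k : Nat) (v : Option Int) (hv : v ≠ some 2)
    (h : ∀ k, l.getD k none ≠ some 2) : (l.set j v).getD k none ≠ some 2 := by
  simp only [List.getD_eq_getElem?_getD, List.getElem?_set]
  split_ifs with h1 h2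
  · simpa using hv
  · simp
  · have := h k; rw [List.getD_eq_getElem?_getD] at this; exact this

lemma pvPass1_len (wordle guess : String) : (pvPass1 wordle guess).length = 5 := by
  unfold pvPass1
  have h : ∀ (L : List Int) (st : List (Option Int)),
      (L.foldl (fun state ltr =>
        let g := (PySem.Str.pyGet? guess ltr).getD ' '
        let w := (PySem.Str.pyGet? wordle ltr).getD ' '
        if g == w then state.set ltr.toNat (some 1)
        else if !(PySem.Str.isIn (String.ofList [g]) wordle) then state.set ltr.toNat (some 0)
        else state) st).length = st.length := by
    intro L
    induction L with
    | nil => intro st; rfl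
    | cons a t ih =>
      intro st
      rw [List.foldl_cons, ih]
      dsimp only
      split_ifs <;> simp
  rw [h]
  simp

lemma pvPass1_not2 (wordle guess : String) (k : Nat) :
    (pvPass1 wordle guess).getD k none ≠ some 2 := by
  unfold pvPass1
  have h : ∀ (L : List Int) (st : List (Option Int)), (∀ k, st.getD k none ≠ some 2) →
      ∀ k, ((L.foldl (fun state ltr =>
        let g := (PySem.Str.pyGet? guess ltr).getD ' '
        let w := (PySem.Str.pyGet? wordle ltr).getD ' '
        if g == w then state.set ltr.toNat (some 1)
        else if !(PySem.Str.isIn (String.ofList [g]) wordle) then state.set ltr.toNat (some 0)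
        else state) st).getD k none) ≠ some 2 := by
    intro L
    induction L with
    | nil => intro st h k; exact h k
    | cons a t ih =>
      intro st h k
      rw [List.foldl_cons]
      apply ih
      intro k'
      dsimp only
      split_ifs
      · exact pvGetD_set_not2 _ _ _ _ (by simp) h
      · exact pvGetD_set_not2 _ _ _ _ (by simp) h
      · exact h k'
  refine h _ _ (fun k' => ?_) k
  rw [List.getD_eq_getElem?_getD, List.getElem?_replicate]
  split_ifs <;> simp

lemma pvE_pass1 (wordle guess : String) (c : Char) : pvE guess (pvPass1 wordle guess) c = 0 := by
  have hk : ∀ k : Nat, ¬ (pvPass1 wordle guess)[k]?.getD none = some 2 := by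
    intro k
    have := pvPass1_not2 wordle guess k
    rw [List.getD_eq_getElem?_getD] at this
    exact this
  simp [pvE, show List.range 5 = [0,1,2,3,4] from rfl, List.getD_eq_getElem?_getD, hk]

lemma pvStep_eq (wordle guess : String) (hg : 5 ≤ guess.toList.length)
    (ltr : Int) (h0 : 0 ≤ ltr) (h5 : ltr < 5)
    (st : List (Option Int)) (hlen : st.length = 5) (d : PySem.Dict Char Int)
    (hinv : ∀ c, d.getD c 0 = (wordle.toList.count c : Int) - pvE guess st c) :
    (pvStepB guess (st, d) ltr).1 = pvStepA wordle guess st ltr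
    ∧ (pvStepA wordle guess st ltr).length = 5
    ∧ ∀ c, (pvStepB guess (st, d) ltr).2.getD c 0
        = (wordle.toList.count c : Int) - pvE guess (pvStepA wordle guess st ltr) c := by
  have hidx : ∀ i : Int, 0 ≤ i → i < 5 →
      PySem.List.pyIdx? guess.length i = some i.toNat := by
    intro i hi hi5
    have hg' : 5 ≤ guess.length := by
      rw [show guess.length = guess.toList.length from rfl]; exact hg
    simp only [PySem.List.pyIdx?, if_pos hi]
    rw [if_pos (by omega : i < (guess.length : Int))]
  have hidxL : ∀ i : Int, 0 ≤ i → i < 5 →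
      PySem.List.pyIdx? guess.toList.length i = some i.toNat := by
    intro i hi hi5
    simp only [PySem.List.pyIdx?, if_pos hi]
    rw [if_pos (by omega : i < (guess.toList.length : Int))]
  have hidx5 : ∀ i : Int, 0 ≤ i → i < 5 → PySem.List.pyIdx? 5 i = some i.toNat := by
    intro i hi hi5
    simp only [PySem.List.pyIdx?, if_pos hi]
    rw [if_pos (by omega)]
  have eG0 := hidx 0 (by norm_num) (by norm_num)
  have eG1 := hidx 1 (by norm_num) (by norm_num)
  have eG2 := hidx 2 (by norm_num) (by norm_num)
  have eG3 := hidx 3 (by norm_num) (by norm_num)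
  have eG4 := hidx 4 (by norm_num) (by norm_num)
  have eL0 := hidxL 0 (by norm_num) (by norm_num)
  have eL1 := hidxL 1 (by norm_num) (by norm_num)
  have eL2 := hidxL 2 (by norm_num) (by norm_num)
  have eL3 := hidxL 3 (by norm_num) (by norm_num)
  have eL4 := hidxL 4 (by norm_num) (by norm_num)
  have e50 := hidx5 0 (by norm_num) (by norm_num)
  have e51 := hidx5 1 (by norm_num) (by norm_num)
  have e52 := hidx5 2 (by norm_num) (by norm_num)
  have e53 := hidx5 3 (by norm_num) (by norm_num)
  have e54 := hidx5 4 (by norm_num) (by norm_num)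
  rcases st with _|⟨s0, st⟩; · simp at hlen
  rcases st with _|⟨s1, st⟩; · simp at hlen
  rcases st with _|⟨s2, st⟩; · simp at hlen
  rcases st with _|⟨s3, st⟩; · simp at hlen
  rcases st with _|⟨s4, st⟩; · simp at hlen
  rcases st with _|⟨s5, st⟩; swap; · simp at hlen
  clear hlen
  rcases hskip : (PySem.List.pyGet? [s0,s1,s2,s3,s4] ltr).getD none with _ | v
  swap
  · refine ⟨?_, ?_, ?_⟩ <;> simp [pvStepA, pvStepB, hskip, hinv]
  -- current letter of the guess
  have hA : ((PySem.Str.count wordle (String.ofList [(PySem.Str.pyGet? guess ltr).getD ' ']) : Int) >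
      (PySem.List.pyRange 0 5 1).foldl (fun mc k =>
        if k == ltr then mc
        else if ((PySem.Str.pyGet? guess k).getD ' ' == (PySem.Str.pyGet? guess ltr).getD ' ')
                && ((PySem.List.pyGet? [s0,s1,s2,s3,s4] k).getD none == some 2) then mc + 1
        else mc) 0)
      ↔ d.getD ((PySem.Str.pyGet? guess ltr).getD ' ') 0 > 0 := by
    rw [hinv]
    have hmark : ((PySem.List.pyRange 0 5 1).foldl (fun mc k =>
        if k == ltr then mc
        else if ((PySem.Str.pyGet? guess k).getD ' ' == (PySem.Str.pyGet? guess ltr).getD ' ')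
                && ((PySem.List.pyGet? [s0,s1,s2,s3,s4] k).getD none == some 2) then mc + 1
        else mc) 0) = pvE guess [s0,s1,s2,s3,s4] ((PySem.Str.pyGet? guess ltr).getD ' ') := by
      interval_cases ltr <;>
      · simp only [PySem.List.pyGet?, List.length_cons, List.length_nil, hidx5 _ (by omega) (by omega),
          Option.bind_some] at hskip
        try simp only [show ((0:Nat)+1+1+1+1+1) = 5 from rfl] at hskip
        try simp only [List.getElem?_cons_zero, List.getElem?_cons_succ, Option.getD_some,
          show Int.toNat 0 = 0 from rfl, show Int.toNat 1 = 1 from rfl, show Int.toNat 2 = 2 from rfl, show Int.toNat 3 = 3 from rfl, show Int.toNat 4 = 4 from rfl] at hskip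
        subst hskip
        simp only [show PySem.List.pyRange 0 5 1 = [(0:Int),1,2,3,4] from rfl,
          show List.range 5 = [0,1,2,3,4] from rfl,
          PySem.Str.pyGet?, PySem.Chars.pyGet?_eq_listPyGet?, PySem.List.pyGet?]
        simp [eG0, eG1, eG2, eG3, eG4, eL0, eL1, eL2, eL3, eL4, e50, e51, e52, e53, e54, pvE, show List.range 5 = [0,1,2,3,4] from rfl,
          List.getD_eq_getElem?_getD]
        split_ifs <;> omega
    rw [hmark, show PySem.Str.count wordle (String.ofList [(PySem.Str.pyGet? guess ltr).getD ' '])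
        = wordle.toList.count ((PySem.Str.pyGet? guess ltr).getD ' ') from by
      rw [show PySem.Str.count wordle (String.ofList [(PySem.Str.pyGet? guess ltr).getD ' '])
          = PySem.Chars.count wordle.toList [(PySem.Str.pyGet? guess ltr).getD ' '] from by
        simp [PySem.Str.count]]
      exact pvCountSingle wordle.toList _]
    omega
  have hskip' : ((PySem.List.pyGet? [s0,s1,s2,s3,s4] ltr).getD none).isSome = false := by
    rw [hskip]; rfl
  refine ⟨?_, ?_, ?_⟩
  · simp only [pvStepA, pvStepB, hskip', Bool.false_eq_true, if_false, hA]
    split_ifs <;> rfl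
  · simp only [pvStepA, hskip', Bool.false_eq_true, if_false]
    split_ifs <;> simp
  · intro c'
    simp only [pvStepA, pvStepB, hskip', Bool.false_eq_true, if_false, hA]
    by_cases hB : d.getD ((PySem.Str.pyGet? guess ltr).getD ' ') 0 > 0
    · simp only [if_pos hB]
      rw [PySem.Dict.getD_insert]
      by_cases hc : c' = (PySem.Str.pyGet? guess ltr).getD ' '
      · rw [if_pos hc, hinv, hc]
        have hE2 : pvE guess ([s0,s1,s2,s3,s4].set ltr.toNat (some 2))
              ((PySem.Str.pyGet? guess ltr).getD ' ')
            = pvE guess [s0,s1,s2,s3,s4] ((PySem.Str.pyGet? guess ltr).getD ' ') + 1 := by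
          interval_cases ltr <;>
          · simp only [PySem.List.pyGet?, List.length_cons, List.length_nil,
              e50, e51, e52, e53, e54, Option.bind_some] at hskip
            try simp only [show ((0:Nat)+1+1+1+1+1) = 5 from rfl] at hskip
            try simp only [List.getElem?_cons_zero, List.getElem?_cons_succ, Option.getD_some,
              show Int.toNat 0 = 0 from rfl, show Int.toNat 1 = 1 from rfl, show Int.toNat 2 = 2 from rfl, show Int.toNat 3 = 3 from rfl, show Int.toNat 4 = 4 from rfl] at hskip
            subst hskip
            simp only [PySem.Str.pyGet?, PySem.Chars.pyGet?_eq_listPyGet?, PySem.List.pyGet?]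
            simp [eG0, eG1, eG2, eG3, eG4, eL0, eL1, eL2, eL3, eL4, e50, e51, e52, e53, e54, pvE, show List.range 5 = [0,1,2,3,4] from rfl,
              List.getD_eq_getElem?_getD]
            try omega
        rw [hE2]
        omega
      · rw [if_neg hc, hinv]
        have hE2' : pvE guess ([s0,s1,s2,s3,s4].set ltr.toNat (some 2)) c'
            = pvE guess [s0,s1,s2,s3,s4] c' := by
          interval_cases ltr <;>
          · simp only [PySem.List.pyGet?, List.length_cons, List.length_nil,
              e50, e51, e52, e53, e54, Option.bind_some] at hskip
            try simp only [show ((0:Nat)+1+1+1+1+1) = 5 from rfl] at hskip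
            try simp only [List.getElem?_cons_zero, List.getElem?_cons_succ, Option.getD_some,
              show Int.toNat 0 = 0 from rfl, show Int.toNat 1 = 1 from rfl, show Int.toNat 2 = 2 from rfl, show Int.toNat 3 = 3 from rfl, show Int.toNat 4 = 4 from rfl] at hskip
            subst hskip
            simp only [PySem.Str.pyGet?, PySem.Chars.pyGet?_eq_listPyGet?, PySem.List.pyGet?] at hc
            simp only [eG0, eG1, eG2, eG3, eG4, eL0, eL1, eL2, eL3, eL4,
              Option.bind_some, Option.getD_some,
              show Int.toNat 0 = 0 from rfl, show Int.toNat 1 = 1 from rfl, show Int.toNat 2 = 2 from rfl, show Int.toNat 3 = 3 from rfl, show Int.toNat 4 = 4 from rfl] at hc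
            simp [pvE, show List.range 5 = [0,1,2,3,4] from rfl,
              List.getD_eq_getElem?_getD, hc, Ne.symm hc]
            try omega
        rw [hE2']
    · rw [if_neg hB, if_neg hB]
      have hE0 : pvE guess ([s0,s1,s2,s3,s4].set ltr.toNat (some 0)) c'
          = pvE guess [s0,s1,s2,s3,s4] c' := by
        interval_cases ltr <;>
        · simp only [PySem.List.pyGet?, List.length_cons, List.length_nil,
            e50, e51, e52, e53, e54, Option.bind_some] at hskip
          try simp only [show ((0:Nat)+1+1+1+1+1) = 5 from rfl] at hskip
          try simp only [List.getElem?_cons_zero, List.getElem?_cons_succ, Option.getD_some,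
            show Int.toNat 0 = 0 from rfl, show Int.toNat 1 = 1 from rfl, show Int.toNat 2 = 2 from rfl, show Int.toNat 3 = 3 from rfl, show Int.toNat 4 = 4 from rfl] at hskip
          subst hskip
          simp [pvE, show List.range 5 = [0,1,2,3,4] from rfl,
            List.getD_eq_getElem?_getD]
          try omega
      dsimp only
      rw [hinv, hE0]

lemma pvLoops_eq (wordle guess : String) (hg : 5 ≤ guess.toList.length) :
    ∀ (L : List Int) (st : List (Option Int)) (d : PySem.Dict Char Int),
      st.length = 5 →
      (∀ l ∈ L, 0 ≤ l ∧ l < 5) →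
      (∀ c, d.getD c 0 = (wordle.toList.count c : Int) - pvE guess st c) →
      (L.foldl (fun p ltr => pvStepB guess p ltr) (st, d)).1
        = L.foldl (fun s ltr => pvStepA wordle guess s ltr) st := by
  intro L
  induction L with
  | nil => intro st d _ _ _; rfl
  | cons a t ih =>
    intro st d hlen hmem hinv
    obtain ⟨heq, hlen', hinv'⟩ :=
      pvStep_eq wordle guess hg a (hmem a (by simp)).1 (hmem a (by simp)).2 st hlen d hinv
    simp only [List.foldl_cons]
    rw [show pvStepB guess (st, d) a
        = (pvStepA wordle guess st a, (pvStepB guess (st, d) a).2) from by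
      rw [← heq]]
    exact ih _ _ hlen' (fun l hl => hmem l (by simp [hl])) hinv'

-- ===== VERDICT (by name: the statement is the Claim_ definition above) =====
theorem get_letter_states_spec : Claim_equal_get_letter_states := by
  intro wordle guess _ hpre
  unfold Spec_get_letter_states get_letter_states get_letter_states_alt
  simp only []
  rw [pvLoops_eq wordle guess hpre.2 (PySem.List.pyRange 0 5 1) (pvPass1 wordle guess) _
    (pvPass1_len wordle guess) (by decide)
    (by
      intro c
      rw [PySem.Dict.getD_foldl_insert_add_one, pvE_pass1]
      simp [PySem.Dict.getD_empty])]
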